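-- pv_equiv track=rewrite | github.com/NurullahGundogdu/Algorithm_Projects | Project_3/Project.py | min_number_op
-- ===== SOURCE A (Python) =====
-- def min_number_op(arr):
--
-- 	sum_of_arr = 0
-- 	op = 0
--
-- 	temp_neg = []
-- 	temp_pos = []
--
-- 	for i in range(len(arr)):
--
-- 		if arr[i] < 0:
-- 			temp_neg.append(arr[i])
-- 		else:
-- 			temp_pos.append(arr[i])
--
--
-- 	temp_neg.sort(reverse= True)
-- 	temp_pos.sort()
--
-- 	i = 0
-- 	j = 0
--
-- 	while i < len(temp_neg) and j < len(temp_pos):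
--
-- 		if temp_pos[j] > (0 - temp_neg[i]):
--
-- 			if i != 0 or j != 0:
--
-- 				if sum_of_arr < 0:
-- 					op += (-1) * (temp_neg[i] + sum_of_arr)
-- 				else:
-- 					op +=  sum_of_arr - temp_neg[i]
--
-- 			sum_of_arr += temp_neg[i]
-- 			i += 1
--
-- 		else:
--
-- 			if i != 0 or j != 0:
--
-- 				if sum_of_arr < 0:
-- 					op += temp_pos[j] - sum_of_arr
-- 				else:
-- 					op += sum_of_arr + temp_pos[j]
--
-- 			sum_of_arr += temp_pos[j]
-- 			j += 1
--
-- 	if i < len(temp_neg):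
-- 		while i < len(temp_neg):
--
-- 			if i != 0 or j != 0:
--
-- 				if sum_of_arr < 0:
-- 					op += (-1) * (temp_neg[i] + sum_of_arr)
-- 				else:
-- 					op += sum_of_arr - temp_neg[i]
--
-- 			sum_of_arr += temp_neg[i]
-- 			i += 1
--
-- 	else:
--
-- 		while j < len(temp_pos):
--
-- 			if i != 0 or j != 0:
--
-- 				if sum_of_arr < 0:
-- 					op += temp_pos[j] - sum_of_arr
-- 				else:
-- 					op += sum_of_arr + temp_pos[j]
--
-- 			sum_of_arr += temp_pos[j]
-- 			j += 1
--
--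
-- 	return sum_of_arr, op
-- ===== SOURCE B (Python) =====
-- def min_number_op(arr):
--     # Single sort by (2*abs(x) + (x < 0)): increasing absolute value, positives before
--     # negatives at equal magnitude -- then one pass adding abs(sum)+abs(x) per merge step.
--     order = sorted(arr, key=lambda x: 2 * abs(x) + (x < 0))
--     sum_of_arr = 0
--     op = 0
--     for k, x in enumerate(order):
--         if k:
--             op += abs(sum_of_arr) + abs(x)
--         sum_of_arr += x
--     return sum_of_arr, op
-- ===== Notes on version B (the rewrite author's own statement) =====
-- stated objective: simpler
-- what changed: A partitions into negatives/positives, sorts each, and merges them with three while-loops containing four sign-dependent op-update branches; B does one sort keyed by 2*abs(x)+(x<0) (abs ascending, positives before negatives on ties) and a single enumerate pass adding abs(sum)+abs(x) per non-first element.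
import Mathlib
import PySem

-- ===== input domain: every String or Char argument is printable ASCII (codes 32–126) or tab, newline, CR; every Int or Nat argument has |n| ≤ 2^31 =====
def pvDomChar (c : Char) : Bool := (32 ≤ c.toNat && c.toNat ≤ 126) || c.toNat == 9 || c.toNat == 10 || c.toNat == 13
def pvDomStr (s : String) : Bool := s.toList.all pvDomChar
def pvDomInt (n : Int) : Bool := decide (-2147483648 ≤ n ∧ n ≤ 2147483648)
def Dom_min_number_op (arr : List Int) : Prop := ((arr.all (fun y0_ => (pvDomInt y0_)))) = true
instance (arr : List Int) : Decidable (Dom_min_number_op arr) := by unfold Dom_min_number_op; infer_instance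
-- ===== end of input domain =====

-- B replaces A's partition + two sorts + three sign-branching merge loops by one sort
-- keyed 2*|x| + (x<0) and a single pass adding |sum|+|x| per step (objective: simpler).

-- ===== PORT A =====
-- trailing 'while i < len(temp_neg)' loop (s = sum_of_arr; first = 'i==0 and j==0')
def pvLoopNeg : List Int → Int → Int → Bool → Int × Int
  | [], s, op, _ => (s, op)
  | n :: rest, s, op, first =>
      let op' := if first then op else (if s < 0 then op + (-1) * (n + s) else op + (s - n))
      pvLoopNeg rest (s + n) op' false

-- trailing 'while j < len(temp_pos)' loop
def pvLoopPos : List Int → Int → Int → Bool → Int × Int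
  | [], s, op, _ => (s, op)
  | p :: rest, s, op, first =>
      let op' := if first then op else (if s < 0 then op + (p - s) else op + (s + p))
      pvLoopPos rest (s + p) op' false

-- the main 'while i < len(temp_neg) and j < len(temp_pos)' loop, then the if/else tail
def pvMerge : List Int → List Int → Int → Int → Bool → Int × Int
  | n :: nr, p :: pr, s, op, first =>
      if p > 0 - n then
        let op' := if first then op else (if s < 0 then op + (-1) * (n + s) else op + (s - n))
        pvMerge nr (p :: pr) (s + n) op' false
      else
        let op' := if first then op else (if s < 0 then op + (p - s) else op + (s + p))
        pvMerge (n :: nr) pr (s + p) op' false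
  | negs, poss, s, op, first =>
      if negs ≠ [] then pvLoopNeg negs s op first else pvLoopPos poss s op first

def min_number_op (arr : List Int) : Int × Int :=
  let t := (PySem.List.pyRange 0 arr.length 1).foldl
    (fun (t : List Int × List Int) i =>
      let x := PySem.List.pyGetD arr i 0
      if x < 0 then (t.1 ++ [x], t.2) else (t.1, t.2 ++ [x])) ([], [])
  let temp_neg := PySem.List.sorted t.1 (fun x => x) true
  let temp_pos := PySem.List.sorted t.2 (fun x => x) false
  pvMerge temp_neg temp_pos 0 0 true

-- ===== PORT B =====
def min_number_op_alt (arr : List Int) : Int × Int :=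
  let order := PySem.List.sorted arr (fun x => 2 * |x| + (if x < 0 then 1 else 0)) false
  (PySem.List.enumerate order).foldl
    (fun (acc : Int × Int) kx =>
      let op := if kx.1 ≠ 0 then acc.2 + (|acc.1| + |kx.2|) else acc.2
      (acc.1 + kx.2, op)) (0, 0)

-- ===== PRECONDITION & SPEC =====
def Spec_min_number_op (arr : List Int) (out : Int × Int) : Prop := out = min_number_op_alt arr
instance (arr : List Int) (out : Int × Int) : Decidable (Spec_min_number_op arr out) := by unfold Spec_min_number_op; infer_instance

-- ===== CLAIM (what is proved, stated in full; the proofs are below) =====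
def Claim_equal_min_number_op : Prop := ∀ (arr : List Int), Dom_min_number_op arr → Spec_min_number_op arr (min_number_op arr)

-- ===== LEMMAS AND PROOFS =====

-- the common reference fold: one pass, op += |s| + |x| except on the very first element
def pvGo : List Int → Int → Int → Bool → Int × Int
  | [], s, op, _ => (s, op)
  | x :: rest, s, op, first =>
      pvGo rest (s + x) (if first then op else op + (|s| + |x|)) false

-- the order in which A's merge consumes elements
def pvOrd : List Int → List Int → List Int
  | n :: nr, p :: pr => if p > 0 - n then n :: pvOrd nr (p :: pr) else p :: pvOrd (n :: nr) pr
  | negs, poss => negs ++ poss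

def pvKey (x : Int) : Int := 2 * |x| + (if x < 0 then 1 else 0)

-- A's four sign branches collapse to op + (|s| + |x|)
theorem pvOpNeg (op s n : Int) (hn : n < 0) :
    (if s < 0 then op + (-1) * (n + s) else op + (s - n)) = op + (|s| + |n|) := by
  rcases abs_cases s with ⟨h1, _⟩ | ⟨h1, _⟩ <;> rcases abs_cases n with ⟨g1, _⟩ | ⟨g1, _⟩ <;>
    split_ifs <;> omega

theorem pvOpPos (op s p : Int) (hp : 0 ≤ p) :
    (if s < 0 then op + (p - s) else op + (s + p)) = op + (|s| + |p|) := by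
  rcases abs_cases s with ⟨h1, _⟩ | ⟨h1, _⟩ <;> rcases abs_cases p with ⟨g1, _⟩ | ⟨g1, _⟩ <;>
    split_ifs <;> omega

theorem pvKey_inj : Function.Injective pvKey := by
  intro a b h
  unfold pvKey at h
  rcases abs_cases a with ⟨ha, _⟩ | ⟨ha, _⟩ <;> rcases abs_cases b with ⟨hb, _⟩ | ⟨hb, _⟩ <;>
    split_ifs at h <;> omega

theorem pvKey_mono_neg {a b : Int} (ha : a < 0) (hb : b < 0) (h : b ≤ a) : pvKey a ≤ pvKey b := by
  simp [pvKey, abs_of_neg ha, abs_of_neg hb]; omega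

theorem pvKey_mono_pos {a b : Int} (ha : 0 ≤ a) (hb : 0 ≤ b) (h : a ≤ b) : pvKey a ≤ pvKey b := by
  simp [pvKey, abs_of_nonneg ha, abs_of_nonneg hb, ha.not_gt, hb.not_gt]; omega

theorem pvKey_neg_le_pos {n p : Int} (hn : n < 0) (hp : 0 ≤ p) (h : -n < p) : pvKey n ≤ pvKey p := by
  simp [pvKey, abs_of_neg hn, abs_of_nonneg hp, hn, hp.not_gt]; omega

theorem pvKey_pos_le_neg {n p : Int} (hn : n < 0) (hp : 0 ≤ p) (h : p ≤ -n) : pvKey p ≤ pvKey n := by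
  simp [pvKey, abs_of_neg hn, abs_of_nonneg hp, hn, hp.not_gt]; omega

theorem pvLoopNeg_eq_go (l : List Int) (hneg : ∀ x ∈ l, x < 0) :
    ∀ s op first, pvLoopNeg l s op first = pvGo l s op first := by
  induction l with
  | nil => intro s op first; rfl
  | cons n rest ih =>
    intro s op first
    have hn : n < 0 := hneg n (by simp)
    simp only [pvLoopNeg, pvGo]
    rw [ih (fun x hx => hneg x (by simp [hx]))]
    rw [pvOpNeg op s n hn]

theorem pvLoopPos_eq_go (l : List Int) (hpos : ∀ x ∈ l, 0 ≤ x) :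
    ∀ s op first, pvLoopPos l s op first = pvGo l s op first := by
  induction l with
  | nil => intro s op first; rfl
  | cons p rest ih =>
    intro s op first
    have hp : 0 ≤ p := hpos p (by simp)
    simp only [pvLoopPos, pvGo]
    rw [ih (fun x hx => hpos x (by simp [hx]))]
    rw [pvOpPos op s p hp]

theorem pvMerge_eq_go (negs : List Int) :
    ∀ (poss : List Int), (∀ x ∈ negs, x < 0) → (∀ x ∈ poss, 0 ≤ x) →
    ∀ s op first, pvMerge negs poss s op first = pvGo (pvOrd negs poss) s op first := by
  induction negs with
  | nil =>
    intro poss _ hpos s op first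
    simp only [pvMerge, pvOrd, List.nil_append]
    simpa using pvLoopPos_eq_go poss hpos s op first
  | cons n nr ihn =>
    intro poss hneg
    have hn : n < 0 := hneg n (by simp)
    induction poss with
    | nil =>
      intro _ s op first
      simp only [pvMerge, pvOrd, List.append_nil]
      simpa using pvLoopNeg_eq_go (n :: nr) hneg s op first
    | cons p pr ihp =>
      intro hpos s op first
      have hp : 0 ≤ p := hpos p (by simp)
      simp only [pvMerge, pvOrd]
      split
      · rw [ihn (p :: pr) (fun x hx => hneg x (by simp [hx])) hpos]
        simp only [pvGo]
        rw [pvOpNeg op s n hn]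
      · rw [ihp (fun x hx => hpos x (by simp [hx]))]
        simp only [pvGo]
        rw [pvOpPos op s p hp]

theorem pvOrd_perm (negs : List Int) :
    ∀ poss : List Int, (pvOrd negs poss).Perm (negs ++ poss) := by
  induction negs with
  | nil => intro poss; simp [pvOrd]
  | cons n nr ihn =>
    intro poss
    induction poss with
    | nil => simp [pvOrd]
    | cons p pr ihp =>
      simp only [pvOrd]
      split
      · exact (ihn (p :: pr)).cons n
      · exact ((ihp.cons p).trans List.perm_middle.symm)

theorem pvOrd_pairwise (negs : List Int) :
    ∀ poss : List Int, (∀ x ∈ negs, x < 0) → (∀ x ∈ poss, 0 ≤ x) →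
    negs.Pairwise (fun a b => b ≤ a) → poss.Pairwise (fun a b => a ≤ b) →
    (pvOrd negs poss).Pairwise (fun a b => pvKey a ≤ pvKey b) := by
  induction negs with
  | nil =>
    intro poss _ hpos _ hp
    simp only [pvOrd, List.nil_append]
    exact hp.imp_of_mem (fun {a b} ha hb h =>
      pvKey_mono_pos (hpos a ha) (hpos b hb) h)
  | cons n nr ihn =>
    intro poss hneg hpos hns hps
    have hn : n < 0 := hneg n (by simp)
    induction poss with
    | nil =>
      simp only [pvOrd, List.append_nil]
      exact hns.imp_of_mem (fun {a b} ha hb h =>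
        pvKey_mono_neg (hneg a ha) (hneg b hb) h)
    | cons p pr ihp =>
      have hp : 0 ≤ p := hpos p (by simp)
      simp only [pvOrd]
      split
      · rename_i hgt
        rw [List.pairwise_cons]
        refine ⟨?_, ihn (p :: pr) (fun x hx => hneg x (by simp [hx])) hpos
          (List.pairwise_cons.mp hns).2 hps⟩
        intro y hy
        have hy' : y ∈ nr ++ (p :: pr) := (pvOrd_perm nr (p :: pr)).mem_iff.mp hy
        rcases List.mem_append.mp hy' with h1 | h2
        · exact pvKey_mono_neg hn (hneg y (by simp [h1]))
            ((List.pairwise_cons.mp hns).1 y h1)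
        · have hyp : p ≤ y := by
            rcases List.mem_cons.mp h2 with rfl | h3
            · exact le_refl y
            · exact (List.pairwise_cons.mp hps).1 y h3
          exact pvKey_neg_le_pos hn (hpos y h2) (by omega)
      · rename_i hle
        rw [List.pairwise_cons]
        refine ⟨?_, ihp (fun x hx => hpos x (by simp [hx])) (List.pairwise_cons.mp hps).2⟩
        intro y hy
        have hy' : y ∈ (n :: nr) ++ pr := (pvOrd_perm (n :: nr) pr).mem_iff.mp hy
        rcases List.mem_append.mp hy' with h1 | h2
        · have hyn : y ≤ n := by
            rcases List.mem_cons.mp h1 with rfl | h3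
            · exact le_refl y
            · exact (List.pairwise_cons.mp hns).1 y h3
          exact (pvKey_pos_le_neg hn hp (by omega)).trans
            (pvKey_mono_neg hn (hneg y h1) hyn)
        · exact pvKey_mono_pos hp (hpos y (by simp [h2]))
            ((List.pairwise_cons.mp hps).1 y h2)

-- A's partition loop produces (filter (<0), filter (≥0))
theorem pvPartition (arr : List Int) :
    ∀ (a b : List Int),
      arr.foldl (fun (t : List Int × List Int) x =>
        if x < 0 then (t.1 ++ [x], t.2) else (t.1, t.2 ++ [x])) (a, b) =
      (a ++ arr.filter (fun x => decide (x < 0)), b ++ arr.filter (fun x => !decide (x < 0))) := by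
  induction arr with
  | nil => intro a b; simp
  | cons x rest ih =>
    intro a b
    by_cases hx : x < 0 <;> simp [hx, List.foldl_cons, ih]

-- B's fold over the enumerated tail (all indices ≥ 1) is pvGo with first = false
theorem pvAlt_tail (l : List Int) :
    ∀ (k : Int), 1 ≤ k → ∀ (s op : Int),
      (PySem.List.enumerate l k).foldl
        (fun (acc : Int × Int) kx =>
          let op := if kx.1 ≠ 0 then acc.2 + (|acc.1| + |kx.2|) else acc.2
          (acc.1 + kx.2, op)) (s, op) = pvGo l s op false := by
  induction l with
  | nil => intro k _ s op; rfl
  | cons x rest ih =>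
    intro k hk s op
    rw [PySem.List.enumerate_cons]
    simp only [List.foldl_cons, pvGo]
    have : k ≠ 0 := by omega
    simp only [this, ne_eq, not_false_eq_true, if_pos]
    exact ih (k + 1) (by omega) (s + x) (op + (|s| + |x|))

theorem pvAlt_eq_go (order : List Int) :
    (PySem.List.enumerate order 0).foldl
      (fun (acc : Int × Int) kx =>
        let op := if kx.1 ≠ 0 then acc.2 + (|acc.1| + |kx.2|) else acc.2
        (acc.1 + kx.2, op)) (0, 0) = pvGo order 0 0 true := by
  cases order with
  | nil => rfl
  | cons x rest =>
    rw [PySem.List.enumerate_cons]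
    simp only [List.foldl_cons, pvGo, ne_eq, not_true_eq_false, if_pos,
      zero_add]
    simpa using pvAlt_tail rest 1 (by omega) x 0

-- ===== VERDICT (by name: the statement is the Claim_ definition above) =====
theorem min_number_op_spec : Claim_equal_min_number_op := by
  intro arr _
  unfold Spec_min_number_op min_number_op min_number_op_alt
  rw [PySem.List.foldl_pyRange_zero_pyGetD' arr 0
    (fun (t : List Int × List Int) x =>
      if x < 0 then (t.1 ++ [x], t.2) else (t.1, t.2 ++ [x])) ([], [])]
  rw [pvPartition arr [] []]
  simp only [List.nil_append]
  set negs := PySem.List.sorted (arr.filter (fun x => decide (x < 0))) (fun x => x) true with hnegs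
  set poss := PySem.List.sorted (arr.filter (fun x => !decide (x < 0))) (fun x => x) false with hposs
  have hneg : ∀ x ∈ negs, x < 0 := by
    intro x hx
    have := (PySem.List.mem_sorted _ _ _ x).mp hx
    simpa using (List.mem_filter.mp this).2
  have hpos : ∀ x ∈ poss, 0 ≤ x := by
    intro x hx
    have := (PySem.List.mem_sorted _ _ _ x).mp hx
    have := (List.mem_filter.mp this).2
    simp at this; omega
  rw [pvMerge_eq_go negs poss hneg hpos 0 0 true, pvAlt_eq_go]
  congr 1
  -- the merge order equals the single sorted order
  have hperm : (pvOrd negs poss).Perm arr := by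
    refine (pvOrd_perm negs poss).trans ?_
    refine ((PySem.List.sorted_perm _ _ _).append (PySem.List.sorted_perm _ _ _)).trans ?_
    exact List.filter_append_perm _ arr
  have hsp : (PySem.List.sorted arr (fun x => 2 * |x| + (if x < 0 then 1 else 0)) false).Perm arr :=
    PySem.List.sorted_perm _ _ _
  have hpw1 : (pvOrd negs poss).Pairwise (fun a b => pvKey a ≤ pvKey b) := by
    refine pvOrd_pairwise negs poss hneg hpos ?_ ?_
    · exact PySem.List.sorted_pairwise_rev _ _
    · exact PySem.List.sorted_pairwise _ _
  have hpw2 : (PySem.List.sorted arr (fun x => 2 * |x| + (if x < 0 then 1 else 0)) false).Pairwise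
      (fun a b => pvKey a ≤ pvKey b) := PySem.List.sorted_pairwise arr pvKey
  exact PySem.List.eq_of_perm_of_pairwise_le_of_injective pvKey pvKey_inj
    (hperm.trans hsp.symm) hpw1 hpw2
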